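-- pv_equiv track=rewrite | github.com/Evdokia-Gneusheva/Reshaping-quantum-device-noise | rho.py | list_to_bitstring_dict
-- ===== SOURCE A (Python) =====
-- def list_to_bitstring_dict(counts):
--     bitstring_dict = {}
--
--     for bitlist in counts:
--         # Convert the list to a bitstring
--         bitstring = ''.join(map(str, bitlist))
--
--         # Count the occurrences of the bitstring
--         if bitstring in bitstring_dict:
--             bitstring_dict[bitstring] += 1
--         else:
--             bitstring_dict[bitstring] = 1
--
--     return bitstring_dict
-- ===== SOURCE B (Python) =====
-- def list_to_bitstring_dict(counts):
--     strings = [''.join(map(str, bitlist)) for bitlist in counts]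
--     return {s: strings.count(s) for s in dict.fromkeys(strings)}
-- ===== Notes on version B (the rewrite author's own statement) =====
-- stated objective: alternative
-- what changed: Replaces the incremental dict-counting loop by building the bitstring list once, deduplicating it in first-occurrence order (dict.fromkeys), and counting each distinct bitstring with list.count.
import Mathlib
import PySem

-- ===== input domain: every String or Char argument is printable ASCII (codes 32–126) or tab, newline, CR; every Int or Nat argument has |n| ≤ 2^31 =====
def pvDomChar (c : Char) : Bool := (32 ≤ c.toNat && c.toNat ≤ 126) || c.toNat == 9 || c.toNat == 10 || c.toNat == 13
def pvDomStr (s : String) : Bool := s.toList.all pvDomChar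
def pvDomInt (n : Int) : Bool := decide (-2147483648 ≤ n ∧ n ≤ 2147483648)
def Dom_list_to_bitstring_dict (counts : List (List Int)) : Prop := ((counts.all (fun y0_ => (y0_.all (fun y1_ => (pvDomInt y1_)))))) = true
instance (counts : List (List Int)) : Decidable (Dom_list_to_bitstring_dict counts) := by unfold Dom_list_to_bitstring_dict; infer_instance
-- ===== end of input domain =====

-- B: builds the bitstring list once, dedups it in first-occurrence order and counts each
-- distinct bitstring with list.count — an alternative decomposition, not claimed faster.

-- ===== PORT A =====
def list_to_bitstring_dict (counts : List (List Int)) : List (String × Int) :=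
  (counts.foldl (fun bitstring_dict bitlist =>
      let bitstring := PySem.Str.join "" (bitlist.map PySem.Int.toStr)
      if bitstring_dict.contains bitstring then
        bitstring_dict.insert bitstring (bitstring_dict.getD bitstring 0 + 1)
      else
        bitstring_dict.insert bitstring 1)
    PySem.Dict.empty).items

-- ===== PORT B =====
def list_to_bitstring_dict_alt (counts : List (List Int)) : List (String × Int) :=
  let strings := counts.map (fun bitlist => PySem.Str.join "" (bitlist.map PySem.Int.toStr))
  (PySem.List.dedup strings).map (fun s => (s, (strings.count s : Int)))

-- ===== PRECONDITION & SPEC =====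
def Spec_list_to_bitstring_dict (counts : List (List Int)) (out : List (String × Int)) : Prop := out = list_to_bitstring_dict_alt counts
instance (counts : List (List Int)) (out : List (String × Int)) : Decidable (Spec_list_to_bitstring_dict counts out) := by unfold Spec_list_to_bitstring_dict; infer_instance

-- ===== CLAIM (what is proved, stated in full; the proofs are below) =====
def Claim_equal_list_to_bitstring_dict : Prop := ∀ (counts : List (List Int)), Dom_list_to_bitstring_dict counts → Spec_list_to_bitstring_dict counts (list_to_bitstring_dict counts)

-- ===== LEMMAS AND PROOFS =====

-- A's fold over bitlists, mapped to bitstrings, is the standard counting fold: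
-- the '+= 1' / '= 1' branch is one update, since getD is 0 on a missing key.
theorem pvFoldEq (counts : List (List Int)) (d : PySem.Dict String Int) :
    counts.foldl (fun bitstring_dict bitlist =>
        let bitstring := PySem.Str.join "" (bitlist.map PySem.Int.toStr)
        if bitstring_dict.contains bitstring then
          bitstring_dict.insert bitstring (bitstring_dict.getD bitstring 0 + 1)
        else bitstring_dict.insert bitstring 1) d
      = (counts.map (fun bitlist => PySem.Str.join "" (bitlist.map PySem.Int.toStr))).foldl
          (fun d s => d.insert s (d.getD s 0 + 1)) d := by
  induction counts generalizing d with
  | nil => rfl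
  | cons b bs ih =>
      simp only [List.foldl_cons, List.map_cons]
      rw [← ih]
      congr 1
      by_cases h : d.contains (PySem.Str.join "" (b.map PySem.Int.toStr))
      · simp [h]
      · have h0 : d.getD (PySem.Str.join "" (b.map PySem.Int.toStr)) 0 = 0 :=
          PySem.Dict.getD_of_not_contains d 0 (by simpa using h)
        simp [h, h0]

-- ===== VERDICT (by name: the statement is the Claim_ definition above) =====
theorem list_to_bitstring_dict_spec : Claim_equal_list_to_bitstring_dict := by
  intro counts _
  unfold Spec_list_to_bitstring_dict list_to_bitstring_dict list_to_bitstring_dict_alt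
  rw [pvFoldEq, PySem.Dict.foldl_insert_getD_add_one_eq_counter, PySem.Dict.items_counter]
  simp [PySem.List.dedup_eq_ofList]
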